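-- pv_equiv track=rewrite | github.com/DataBrewery/cubes | cubes/util.py | combine_nodes
-- ===== SOURCE A (Python) =====
-- import itertools
--
-- def node_level_points(node):
--     """Get all level points within given node. Node is described as tuple:
--     (object, levels) where levels is a list or a tuple"""
--
--     levels = []
--     points = []
--     for level in node[1]:
--         levels.append(level)
--         points.append( (node, tuple(levels)))
--
--     return points
--
-- def combine_node_levels(nodes):
--     """Get all possible combinations between each level from each node. It is
--     a cartesian product of first node levels and all combinations of the rest
--     of the levels"""
--
--     if not nodes:
--         raise Exception("List of nodes is empty")
--     if len(nodes) == 1: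
--         current_node = nodes[0]
--         points = node_level_points(current_node)
--
--         # Combos is a list of one-item lists:
--         # combo = (item) => ( ( (name, (level,...)), (plevel, ...)) )
--         # item = (node, plevels) => ( (name, (level,...)), (plevel, ...))
--         # node = (name, levels) => (name, (level,...))
--         # levels = (level)
--
--         combos = []
--         for point in points:
--             combos.append( (point, ) )
--
--         return combos
--     else:
--         current_node = nodes[0]
--         current_name = current_node[0]
--         other_nodes = nodes[1:]
--
--         current_points = node_level_points(current_node) # LIST OF POINTS
--         other_points = combine_node_levels(other_nodes) # LIST OF POINTS ???
--
--
--         combos = []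
--
--         for combo in itertools.product(current_points, other_points):
--             res = (combo[0], ) + combo[1]
--             combos.append(res)
--
--         return list(combos)
--
-- def combine_nodes(all_nodes, required_nodes = []):
--     """Create all combinations of nodes, if required_nodes are specified, make
--     them present in each combination."""
--
--     other_nodes = []
--
--     if not all_nodes:
--         return []
--
--     if not required_nodes:
--         required_nodes = []
--
--     for node in all_nodes:
--         if node not in required_nodes:
--             other_nodes.append(node)
--
--     all_combinations = []
--
--     if required_nodes:
--         all_combinations += combine_node_levels(required_nodes)
--
--     if other_nodes:
--         for i in range(1, len(other_nodes) + 1):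
--             combo_nodes = itertools.combinations(other_nodes, i)
--             for combo in combo_nodes:
--                 out = combine_node_levels(required_nodes + list(combo))
--                 all_combinations += out
--
--     return all_combinations
-- ===== SOURCE B (Python) =====
-- import itertools
--
-- def node_level_points(node):
--     """Get all level points within given node."""
--     levels = []
--     points = []
--     for level in node[1]:
--         levels.append(level)
--         points.append((node, tuple(levels)))
--     return points
--
-- def _levels_product(nodes):
--     """Cartesian product of the level points of each node, last node fastest."""
--     if not nodes:
--         raise Exception("List of nodes is empty")
--     return list(itertools.product(*[node_level_points(n) for n in nodes]))
--
-- def combine_nodes(all_nodes, required_nodes=[]):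
--     """Create all combinations of nodes, if required_nodes are specified, make
--     them present in each combination."""
--     if not all_nodes:
--         return []
--     required_nodes = list(required_nodes or [])
--     other_nodes = [n for n in all_nodes if n not in required_nodes]
--
--     combos = []
--     if required_nodes:
--         combos.extend(_levels_product(required_nodes))
--     for i in range(1, len(other_nodes) + 1):
--         for subset in itertools.combinations(other_nodes, i):
--             combos.extend(_levels_product(required_nodes + list(subset)))
--     return combos
-- ===== Notes on version B (the rewrite author's own statement) =====
-- stated objective: simpler
-- what changed: The recursive combine_node_levels (pairwise itertools.product at each recursion level plus a special one-node base case) is replaced by a single non-recursive itertools.product(*[node_level_points(n) for n in nodes]); the outer function drops the redundant 'if other_nodes' guard and builds other_nodes by comprehension.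
import Mathlib
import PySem

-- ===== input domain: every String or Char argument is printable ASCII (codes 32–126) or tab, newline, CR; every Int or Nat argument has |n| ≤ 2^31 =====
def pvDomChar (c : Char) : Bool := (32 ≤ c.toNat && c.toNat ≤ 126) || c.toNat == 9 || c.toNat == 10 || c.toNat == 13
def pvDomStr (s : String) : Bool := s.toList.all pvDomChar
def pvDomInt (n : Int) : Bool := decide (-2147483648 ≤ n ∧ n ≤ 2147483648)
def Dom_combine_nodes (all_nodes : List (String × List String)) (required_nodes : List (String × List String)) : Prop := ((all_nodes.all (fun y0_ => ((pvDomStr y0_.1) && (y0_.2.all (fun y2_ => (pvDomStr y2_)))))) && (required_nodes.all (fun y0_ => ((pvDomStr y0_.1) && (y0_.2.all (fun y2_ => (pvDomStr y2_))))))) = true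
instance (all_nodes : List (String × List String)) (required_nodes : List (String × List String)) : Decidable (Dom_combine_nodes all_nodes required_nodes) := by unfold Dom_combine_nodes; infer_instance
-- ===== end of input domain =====

-- B replaces A's recursive per-node cartesian product (combine_node_levels) by one flat
-- fold-based product of the per-node level-point lists; objective: simpler.


-- ===== PORT A =====
-- node_level_points: identical helper in A and B (B leaves it unchanged), ported once.
def node_level_points (node : String × List String) : List ((String × List String) × List String) :=
  (node.2.foldl
    (fun (st : List String × List ((String × List String) × List String)) level =>
      let levels := st.1 ++ [level]
      (levels, st.2 ++ [(node, levels)]))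
    ([], [])).2

-- itertools.combinations(l, k) in itertools' order; used by both Pythons.
def combosA : Nat → List (String × List String) → List (List (String × List String))
  | 0, _ => [[]]
  | _ + 1, [] => []
  | k + 1, x :: xs => (combosA k xs).map (fun c => x :: c) ++ combosA (k + 1) xs

-- combine_node_levels; the Python raises on [], which combine_nodes never reaches
-- (the [] branch returns [] here).
def combine_node_levels : List (String × List String) → List (List ((String × List String) × List String))
  | [] => []
  | [n] => (node_level_points n).map (fun p => [p])
  | n :: m :: rest =>
    let current_points := node_level_points n
    let other_points := combine_node_levels (m :: rest)
    current_points.flatMap (fun c => other_points.map (fun o => c :: o))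

def combine_nodes (all_nodes : List (String × List String)) (required_nodes : List (String × List String)) : List (List ((String × List String) × List String)) :=
  if all_nodes.isEmpty then []
  else
    let other_nodes := all_nodes.foldl
      (fun acc node => if node ∈ required_nodes then acc else acc ++ [node]) []
    let all_combinations :=
      if required_nodes.isEmpty then [] else combine_node_levels required_nodes
    if other_nodes.isEmpty then all_combinations
    else
      (List.range' 1 other_nodes.length).foldl
        (fun acc i =>
          (combosA i other_nodes).foldl
            (fun acc2 combo => acc2 ++ combine_node_levels (required_nodes ++ combo)) acc)
        all_combinations

-- ===== PORT B =====
-- list(itertools.product(*[node_level_points(n) for n in nodes])); the Python raises on [],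
-- which combine_nodes_alt never reaches (the [] branch returns [] here).
def levels_product (nodes : List (String × List String)) : List (List ((String × List String) × List String)) :=
  if nodes.isEmpty then []
  else nodes.foldr (fun n acc => (node_level_points n).flatMap (fun p => acc.map (fun t => p :: t))) [[]]

def combine_nodes_alt (all_nodes : List (String × List String)) (required_nodes : List (String × List String)) : List (List ((String × List String) × List String)) :=
  if all_nodes.isEmpty then []
  else
    let other_nodes := all_nodes.filter (fun n => decide (¬ n ∈ required_nodes))
    let base := if required_nodes.isEmpty then [] else levels_product required_nodes
    (List.range other_nodes.length).foldl
      (fun acc i =>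
        (combosA (i + 1) other_nodes).foldl
          (fun acc2 s => acc2 ++ levels_product (required_nodes ++ s)) acc)
      base

-- ===== PRECONDITION & SPEC =====
def Spec_combine_nodes (all_nodes : List (String × List String)) (required_nodes : List (String × List String)) (out : List (List ((String × List String) × List String))) : Prop := out = combine_nodes_alt all_nodes required_nodes
instance (all_nodes : List (String × List String)) (required_nodes : List (String × List String)) (out : List (List ((String × List String) × List String))) : Decidable (Spec_combine_nodes all_nodes required_nodes out) := by unfold Spec_combine_nodes; infer_instance

-- ===== CLAIM (what is proved, stated in full; the proofs are below) =====
def Claim_equal_combine_nodes : Prop := ∀ (all_nodes : List (String × List String)) (required_nodes : List (String × List String)), Dom_combine_nodes all_nodes required_nodes → Spec_combine_nodes all_nodes required_nodes (combine_nodes all_nodes required_nodes)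

-- ===== LEMMAS AND PROOFS =====

theorem combosA_length_mem : ∀ (k : Nat) (l : List (String × List String)) (c : List (String × List String)),
    c ∈ combosA k l → c.length = k := by
  intro k l
  induction l generalizing k with
  | nil =>
    intro c hc
    cases k with
    | zero => simp [combosA] at hc; simp [hc]
    | succ k => simp [combosA] at hc
  | cons x xs ih =>
    intro c hc
    cases k with
    | zero => simp [combosA] at hc; simp [hc]
    | succ k =>
      simp only [combosA, List.mem_append, List.mem_map] at hc
      rcases hc with ⟨d, hd, rfl⟩ | hc
      · simp [ih k d hd]
      · exact ih (k + 1) c hc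

theorem cnl_eq_levels_product : ∀ (ns : List (String × List String)), ns ≠ [] →
    combine_node_levels ns = levels_product ns := by
  intro ns
  induction ns with
  | nil => intro h; exact absurd rfl h
  | cons n rest ih =>
    intro _
    cases rest with
    | nil =>
      simp only [combine_node_levels, levels_product, List.isEmpty_cons, Bool.false_eq_true,
        if_false, List.foldr_cons, List.foldr_nil]
      induction node_level_points n with
      | nil => rfl
      | cons p ps ihp => simp_all [List.flatMap]
    | cons m rest' =>
      have hrec := ih (by simp)
      simp only [combine_node_levels, levels_product, List.isEmpty_cons, Bool.false_eq_true,
        if_false, List.foldr_cons] at hrec ⊢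
      rw [hrec]

theorem foldl_mem_notin_eq_filter (r : List (String × List String)) :
    ∀ (l : List (String × List String)) (acc : List (String × List String)),
      l.foldl (fun acc node => if node ∈ r then acc else acc ++ [node]) acc
        = acc ++ l.filter (fun n => decide (¬ n ∈ r)) := by
  intro l
  induction l with
  | nil => intro acc; simp
  | cons x xs ih =>
    intro acc
    by_cases hx : x ∈ r
    · simp [List.foldl_cons, hx, ih]
    · simp [List.foldl_cons, hx, ih]

theorem inner_foldl_eq (req other : List (String × List String)) (k : Nat) :
    ∀ (acc : List (List ((String × List String) × List String))),
      (combosA (k + 1) other).foldl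
        (fun acc2 combo => acc2 ++ combine_node_levels (req ++ combo)) acc
      = (combosA (k + 1) other).foldl
        (fun acc2 s => acc2 ++ levels_product (req ++ s)) acc := by
  intro acc
  apply List.foldl_ext
  intro a c hc
  have hlen := combosA_length_mem (k + 1) other c hc
  have hne : req ++ c ≠ [] := by
    cases c with
    | nil => simp at hlen
    | cons x xs => simp
  rw [cnl_eq_levels_product _ hne]

theorem combine_nodes_eq (all_nodes required_nodes : List (String × List String)) :
    combine_nodes all_nodes required_nodes = combine_nodes_alt all_nodes required_nodes := by
  unfold combine_nodes combine_nodes_alt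
  by_cases hA : all_nodes.isEmpty = true
  · simp [hA]
  · simp only [hA, Bool.false_eq_true, if_false]
    rw [foldl_mem_notin_eq_filter, List.nil_append]
    have hbase : (if required_nodes.isEmpty = true then [] else combine_node_levels required_nodes)
        = (if required_nodes.isEmpty = true then [] else levels_product required_nodes) := by
      by_cases hr : required_nodes.isEmpty = true
      · simp [hr]
      · have hne : required_nodes ≠ [] := by
          intro h; rw [h] at hr; exact hr rfl
        simp [hr, cnl_eq_levels_product _ hne]
    rw [hbase]
    by_cases ho : (all_nodes.filter (fun n => decide (¬ n ∈ required_nodes))).isEmpty = true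
    · have h0 : all_nodes.filter (fun n => decide (¬ n ∈ required_nodes)) = [] :=
        List.isEmpty_iff.mp ho
      simp only [h0]
      simp
    · simp only [ho, Bool.false_eq_true, if_false]
      rw [List.range'_eq_map_range, List.foldl_map]
      apply List.foldl_ext
      intro a i hi
      have h1 : 1 + i = i + 1 := Nat.add_comm 1 i
      rw [h1]
      exact inner_foldl_eq required_nodes _ i a

-- ===== VERDICT (by name: the statement is the Claim_ definition above) =====
theorem combine_nodes_spec : Claim_equal_combine_nodes := by
  intro all_nodes required_nodes _
  exact combine_nodes_eq all_nodes required_nodes
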